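-- pv_equiv track=rewrite | github.com/pypi-data/pypi-mirror-403 | packages/auto-coder/auto_coder-2.0.43.tar.gz/auto_coder-2.0.43/src/autocoder/terminal/ui/completer.py | _get_current_word
-- ===== SOURCE A (Python) =====
-- def _get_current_word(text: str) -> str:
--     """获取当前光标位置的单词（用于 @ 和 @@ 检测）"""
--     if not text:
--         return ""
--     # 从后往前找到单词边界
--     word_chars = []
--     for char in reversed(text):
--         if char.isspace():
--             break
--         word_chars.append(char)
--     return "".join(reversed(word_chars))
-- ===== SOURCE B (Python) =====
-- def _get_current_word(text: str) -> str:
--     start = 0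
--     for i, char in enumerate(text):
--         if char.isspace():
--             start = i + 1
--     return text[start:]
-- ===== Notes on version B (the rewrite author's own statement) =====
-- stated objective: alternative
-- what changed: B scans left-to-right once maintaining the index after the last whitespace and returns the tail slice, instead of A's reversed scan collecting characters into a list and re-reversing them; no empty-string special case.
import Mathlib
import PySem

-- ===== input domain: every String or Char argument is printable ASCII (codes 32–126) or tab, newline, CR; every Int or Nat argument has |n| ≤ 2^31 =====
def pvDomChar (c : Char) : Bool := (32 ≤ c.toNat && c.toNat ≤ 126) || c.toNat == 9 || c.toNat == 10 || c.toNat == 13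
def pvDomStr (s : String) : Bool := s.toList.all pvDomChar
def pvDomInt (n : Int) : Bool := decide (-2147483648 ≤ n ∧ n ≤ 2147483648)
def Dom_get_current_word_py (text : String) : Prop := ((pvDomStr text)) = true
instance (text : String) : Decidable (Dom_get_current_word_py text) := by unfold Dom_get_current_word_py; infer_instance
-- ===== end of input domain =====

-- B replaces A's reversed collect-and-re-reverse scan by a forward pass keeping the index
-- after the last whitespace and slicing the tail (alternative decomposition, same cost).


-- ===== PORT A =====
-- the for-loop with break: collect chars of the reversed text until a whitespace char
def pvALoop : List Char → List Char
  | [] => []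
  | c :: rest => if PySem.Chars.isspace c then [] else c :: pvALoop rest

def get_current_word_py (text : String) : String :=
  if text = "" then ""
  else String.ofList ((pvALoop text.toList.reverse).reverse)

-- ===== PORT B =====
-- for i, char in enumerate(text): if char.isspace(): start = i + 1
def pvBStart (l : List Char) : Int :=
  (PySem.List.enumerate l 0).foldl
    (fun st p => if PySem.Chars.isspace p.2 then p.1 + 1 else st) 0

-- text[start:]
def get_current_word_py_alt (text : String) : String :=
  String.ofList (PySem.List.slice text.toList (some (pvBStart text.toList)) none)

-- ===== PRECONDITION & SPEC =====
def Spec_get_current_word_py (text : String) (out : String) : Prop := out = get_current_word_py_alt text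
instance (text : String) (out : String) : Decidable (Spec_get_current_word_py text out) := by unfold Spec_get_current_word_py; infer_instance

-- ===== CLAIM (what is proved, stated in full; the proofs are below) =====
def Claim_equal_get_current_word_py : Prop := ∀ (text : String), Dom_get_current_word_py text → Spec_get_current_word_py text (get_current_word_py text)

-- ===== LEMMAS AND PROOFS =====

theorem pvBStart_append_singleton (m : List Char) (c : Char) :
    pvBStart (m ++ [c]) =
      if PySem.Chars.isspace c then (m.length : Int) + 1 else pvBStart m := by
  unfold pvBStart
  rw [PySem.List.enumerate_append, List.foldl_append]
  simp [PySem.List.enumerate_cons, PySem.List.enumerate_nil]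

theorem pvBStart_bounds (l : List Char) :
    0 ≤ pvBStart l ∧ pvBStart l ≤ (l.length : Int) := by
  induction l using List.reverseRecOn with
  | nil => simp [pvBStart, PySem.List.enumerate_nil]
  | append_singleton m c ih =>
      rw [pvBStart_append_singleton]
      simp only [List.length_append, List.length_cons, List.length_nil]
      split <;> push_cast <;> omega

theorem pvMain (l : List Char) :
    (pvALoop l.reverse).reverse = l.drop (pvBStart l).toNat := by
  induction l using List.reverseRecOn with
  | nil => simp [pvALoop, pvBStart, PySem.List.enumerate_nil]
  | append_singleton m c ih =>
      have hb := pvBStart_bounds m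
      rw [pvBStart_append_singleton, List.reverse_append]
      simp only [List.reverse_cons, List.reverse_nil, List.nil_append, List.singleton_append,
        pvALoop]
      by_cases h : PySem.Chars.isspace c
      · rw [if_pos h, if_pos h, List.reverse_nil]
        have ht : ((m.length : Int) + 1).toNat = m.length + 1 := by omega
        rw [ht, List.drop_eq_nil_of_le (by simp)]
      · rw [if_neg h, if_neg h, List.reverse_cons, ih,
          List.drop_append_of_le_length (by omega)]

-- ===== VERDICT (by name: the statement is the Claim_ definition above) =====
theorem get_current_word_py_spec : Claim_equal_get_current_word_py := by
  intro text _
  unfold Spec_get_current_word_py get_current_word_py get_current_word_py_alt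
  have hnn := (pvBStart_bounds text.toList).1
  rw [PySem.List.slice_from _ hnn, ← pvMain]
  split
  · rename_i h; subst h; rfl
  · rfl
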